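-- pv_equiv track=rewrite | github.com/Ashishlulla/infytqPythonpart1 | Practice Problems - Level 1/Practice Problem 13.py | check_22
-- ===== SOURCE A (Python) =====
-- def check_22(num_list):
--     #start writing your code here
--     string = ""
--     for i in num_list:
--         string = string + str(i)
--     if '22' in string:
--         return True
--     else:
--         return False
-- ===== SOURCE B (Python) =====
-- def check_22(num_list):
--     prev2 = False
--     for i in num_list:
--         for c in str(i):
--             if prev2 and c == '2':
--                 return True
--             prev2 = (c == '2')
--     return False
-- ===== Notes on version B (the rewrite author's own statement) =====
-- stated objective: alternative
-- what changed: B replaces A's build-the-whole-concatenated-string-then-substring-search with a single streaming scan that keeps only a was-the-previous-character-'2' flag across number boundaries and returns early on the first match, using O(1) extra space instead of O(total digits).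
import Mathlib
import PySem

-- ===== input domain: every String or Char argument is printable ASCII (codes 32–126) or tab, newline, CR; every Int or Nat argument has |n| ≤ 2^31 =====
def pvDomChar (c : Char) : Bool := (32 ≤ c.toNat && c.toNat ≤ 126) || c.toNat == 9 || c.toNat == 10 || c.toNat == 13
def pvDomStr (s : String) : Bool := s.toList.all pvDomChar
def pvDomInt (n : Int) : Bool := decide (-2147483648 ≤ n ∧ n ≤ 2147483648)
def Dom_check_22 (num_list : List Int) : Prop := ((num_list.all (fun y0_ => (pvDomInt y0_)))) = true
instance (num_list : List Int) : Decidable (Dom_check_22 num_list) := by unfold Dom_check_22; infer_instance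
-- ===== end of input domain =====

-- B replaces A's build-the-whole-string-then-substring-search with a streaming
-- scan keeping one previous-char-was-'2' flag (O(1) extra space, early exit).

-- ===== PORT A =====
-- string = ""; for i in num_list: string = string + str(i); return '22' in string
def check_22 (num_list : List Int) : Bool :=
  let string := num_list.foldl (fun s i => s ++ PySem.Int.toStr i) ""
  if PySem.Str.isIn "22" string then true else false

-- ===== PORT B =====
-- inner loop over the characters of str(i): `none` = early `return True`,
-- `some p` = loop finished with prev2 = p
def check22Inner (prev2 : Bool) : List Char → Option Bool
  | [] => some prev2
  | c :: cs => if prev2 && c == '2' then none else check22Inner (c == '2') cs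

-- outer loop over num_list, threading the prev2 flag
def check22Outer (prev2 : Bool) : List Int → Bool
  | [] => false
  | i :: rest =>
    match check22Inner prev2 (PySem.Int.toStr i).toList with
    | none => true
    | some p => check22Outer p rest

def check_22_alt (num_list : List Int) : Bool := check22Outer false num_list

-- ===== PRECONDITION & SPEC =====
def Spec_check_22 (num_list : List Int) (out : Bool) : Prop := out = check_22_alt num_list
instance (num_list : List Int) (out : Bool) : Decidable (Spec_check_22 num_list out) := by unfold Spec_check_22; infer_instance

-- ===== CLAIM (what is proved, stated in full; the proofs are below) =====
def Claim_equal_check_22 : Prop := ∀ (num_list : List Int), Dom_check_22 num_list → Spec_check_22 num_list (check_22 num_list)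

-- ===== LEMMAS AND PROOFS =====

-- the prev2 flag, abstracted as a one-character history: a '2' if set, nothing if not
def pvPfx (prev2 : Bool) : List Char := if prev2 then ['2'] else []

-- a non-'2' head cannot start a match of "22"
theorem pvInfix_cons_of_ne {c : Char} (h : ¬ c = '2') (l : List Char) :
    (['2','2'] <:+: c :: l) ↔ (['2','2'] <:+: l) := by
  rw [List.infix_cons_iff]
  constructor
  · rintro (hp | hi)
    · rw [List.cons_prefix_cons] at hp; exact absurd hp.1.symm h
    · exact hi
  · exact Or.inr

-- a '2' followed by a non-'2' cannot start a match of "22" either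
theorem pvInfix_two_cons {c : Char} (h : ¬ c = '2') (l : List Char) :
    (['2','2'] <:+: '2' :: c :: l) ↔ (['2','2'] <:+: l) := by
  rw [List.infix_cons_iff, List.cons_prefix_cons, List.cons_prefix_cons,
    pvInfix_cons_of_ne h]
  constructor
  · rintro (⟨-, hc, -⟩ | hi)
    · exact absurd hc.symm h
    · exact hi
  · exact Or.inr

-- the flag-abstracted list advances by one scanned character
theorem pvPfx_step (prev2 : Bool) (c : Char) (l : List Char)
    (hg : ¬ (prev2 && c == '2') = true) :
    (['2','2'] <:+: pvPfx prev2 ++ c :: l) ↔ (['2','2'] <:+: pvPfx (c == '2') ++ l) := by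
  by_cases hc : c = '2'
  · subst hc
    have hp : prev2 = false := by cases prev2 <;> simp_all
    subst hp
    simp [pvPfx]
  · have hc' : (c == '2') = false := beq_eq_false_iff_ne.mpr hc
    rw [hc']
    cases prev2 with
    | false => simpa [pvPfx] using pvInfix_cons_of_ne hc l
    | true => simpa [pvPfx] using pvInfix_two_cons hc l

-- if the inner scan returns early, "22" occurs in pfx ++ cs
theorem pvInner_none (cs : List Char) (prev2 : Bool)
    (h : check22Inner prev2 cs = none) :
    ['2','2'] <:+: (pvPfx prev2 ++ cs) := by
  induction cs generalizing prev2 with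
  | nil => simp [check22Inner] at h
  | cons c cs ih =>
    simp only [check22Inner] at h
    split_ifs at h with hg
    · have h2 : c = '2' := by cases hc : (c == '2') with
        | false => simp [hc] at hg
        | true => exact beq_iff_eq.mp hc
      have hp : prev2 = true := by cases prev2 <;> simp_all
      subst h2 hp
      exact ⟨[], cs, by simp [pvPfx]⟩
    · exact (pvPfx_step prev2 c cs hg).mpr (ih (c == '2') h)

-- if the inner scan finishes with flag p, matches in pfx prev2 ++ cs ++ rest
-- are exactly matches in pfx p ++ rest
theorem pvInner_some (cs : List Char) (prev2 : Bool) (p : Bool) (rest : List Char)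
    (h : check22Inner prev2 cs = some p) :
    (['2','2'] <:+: (pvPfx prev2 ++ cs ++ rest)) ↔ (['2','2'] <:+: (pvPfx p ++ rest)) := by
  induction cs generalizing prev2 with
  | nil =>
    simp only [check22Inner, Option.some.injEq] at h
    subst h
    simp
  | cons c cs ih =>
    simp only [check22Inner] at h
    split_ifs at h with hg
    calc (['2','2'] <:+: pvPfx prev2 ++ (c :: cs) ++ rest)
          ↔ (['2','2'] <:+: pvPfx (c == '2') ++ (cs ++ rest)) := by
            simpa [List.append_assoc] using pvPfx_step prev2 c (cs ++ rest) hg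
        _ ↔ (['2','2'] <:+: pvPfx p ++ rest) := by
            simpa [List.append_assoc] using ih (c == '2') h

-- the outer loop finds "22" iff it occurs in pfx ++ the flattened digit lists
theorem pvOuter (l : List Int) (prev2 : Bool) :
    check22Outer prev2 l = true ↔
      ['2','2'] <:+: (pvPfx prev2 ++ (l.map (fun i => (PySem.Int.toStr i).toList)).flatten) := by
  induction l generalizing prev2 with
  | nil =>
    simp only [check22Outer, List.map_nil, List.flatten_nil, List.append_nil]
    constructor
    · exact fun h => absurd h Bool.false_ne_true
    · intro h
      exfalso
      have := h.length_le
      cases prev2 <;> simp [pvPfx] at this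
  | cons i rest ih =>
    simp only [check22Outer, List.map_cons, List.flatten_cons]
    rcases hinner : check22Inner prev2 (PySem.Int.toStr i).toList with _ | p
    · simp only [true_iff]
      rcases pvInner_none _ _ hinner with ⟨s, t, hst⟩
      exact ⟨s, t ++ (rest.map (fun i => (PySem.Int.toStr i).toList)).flatten,
        by simp only [← List.append_assoc, hst]⟩
    · rw [← List.append_assoc, pvInner_some _ _ _ _ hinner]
      exact ih p

-- the concatenating foldl of A, read as a flatten
theorem pvFoldA (l : List Int) (a : String) :
    (l.foldl (fun s i => s ++ PySem.Int.toStr i) a).toList =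
      a.toList ++ (l.map (fun i => (PySem.Int.toStr i).toList)).flatten := by
  induction l generalizing a with
  | nil => simp
  | cons i rest ih =>
    simp only [List.foldl_cons, List.map_cons, List.flatten_cons, ih, String.toList_append,
      List.append_assoc]

-- ===== VERDICT (by name: the statement is the Claim_ definition above) =====
theorem check_22_spec : Claim_equal_check_22 := by
  intro l _
  unfold Spec_check_22 check_22 check_22_alt
  have hb : ∀ b : Bool, (if b = true then true else false) = b := by decide
  rw [hb]
  rw [Bool.eq_iff_iff, pvOuter l false]
  have h1 := PySem.Str.isIn_iff_infix "22" (l.foldl (fun s i => s ++ PySem.Int.toStr i) "")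
  rw [pvFoldA l ""] at h1
  simpa [pvPfx] using h1
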